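-- pv_equiv track=rewrite | github.com/zensgit/cad-ml-platform | scripts/build_manufacturing_review_manifest.py | _output_columns
-- ===== SOURCE A (Python) =====
-- from typing import Any, Dict, Iterable, List, Optional, Tuple
--
-- def _output_columns(
--     base_columns: Iterable[str],
--     rows: Iterable[Dict[str, str]],
--     extra_columns: Iterable[str],
-- ) -> List[str]:
--     columns = list(dict.fromkeys(base_columns))
--     if not columns:
--         for row in rows:
--             for column in row:
--                 if column not in columns:
--                     columns.append(column)
--     for column in extra_columns:
--         if column not in columns:
--             columns.append(column)
--     return columns
-- ===== SOURCE B (Python) =====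
-- def _dedup(items):
--     # select-and-filter: take the head, drop all its later copies, continue on the remainder
--     out = []
--     while items:
--         head = items[0]
--         out.append(head)
--         items = [x for x in items[1:] if x != head]
--     return out
--
--
-- def _output_columns(base_columns, rows, extra_columns):
--     base = list(base_columns)
--     if base:
--         candidates = base
--     else:
--         candidates = [column for row in rows for column in row]
--     candidates.extend(extra_columns)
--     return _dedup(candidates)
-- ===== Notes on version B (the rewrite author's own statement) =====
-- stated objective: alternative
-- what changed: A deduplicates incrementally by maintaining a growing columns accumulator (dict.fromkeys plus 'not in columns' append loops); B builds one candidate list and deduplicates it by a select-head-and-filter loop (take the head, filter all its later copies out of the remainder, repeat), keeping no seen structure at all.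
import Mathlib
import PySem

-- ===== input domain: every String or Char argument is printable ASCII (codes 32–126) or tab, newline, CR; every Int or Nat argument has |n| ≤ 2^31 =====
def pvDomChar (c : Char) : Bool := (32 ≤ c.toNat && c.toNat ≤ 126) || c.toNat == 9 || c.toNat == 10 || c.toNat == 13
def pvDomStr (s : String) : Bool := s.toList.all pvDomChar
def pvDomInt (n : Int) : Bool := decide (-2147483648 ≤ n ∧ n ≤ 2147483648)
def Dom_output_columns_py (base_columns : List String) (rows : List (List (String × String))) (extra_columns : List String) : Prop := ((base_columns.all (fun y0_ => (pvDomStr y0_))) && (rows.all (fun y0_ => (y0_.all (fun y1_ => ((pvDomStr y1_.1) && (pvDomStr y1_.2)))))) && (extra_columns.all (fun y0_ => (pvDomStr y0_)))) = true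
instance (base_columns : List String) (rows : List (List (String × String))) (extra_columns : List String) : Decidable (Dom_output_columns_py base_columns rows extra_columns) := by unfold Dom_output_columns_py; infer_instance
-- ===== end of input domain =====

-- B builds one candidate list and deduplicates it with a select-head-and-filter loop
-- (no seen-accumulator), instead of A's incremental 'not in columns' append loops; alternative decomposition, similar cost.


-- ===== PORT A =====
def output_columns_py (base_columns : List String) (rows : List (List (String × String))) (extra_columns : List String) : List String :=
  -- columns = list(dict.fromkeys(base_columns))
  let columns := PySem.List.dedup base_columns
  -- if not columns: for row in rows: for column in row: if column not in columns: columns.append(column)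
  let columns :=
    if columns.isEmpty then
      rows.foldl (fun cols row =>
        row.foldl (fun cols p => if cols.contains p.1 then cols else cols ++ [p.1]) cols) columns
    else columns
  -- for column in extra_columns: if column not in columns: columns.append(column)
  extra_columns.foldl (fun cols c => if cols.contains c then cols else cols ++ [c]) columns

-- ===== PORT B =====
-- _dedup: while items: take the head, append it to out, filter its copies out of the rest
def dedupLoop : List String → List String → List String
  | [], out => out
  | x :: xs, out => dedupLoop (xs.filter (fun y => y ≠ x)) (out ++ [x])
termination_by items _ => items.length
decreasing_by
  simp only [List.length_cons, List.length_unattach]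
  exact Nat.lt_succ_of_le ((List.length_filter_le _ _).trans (by simp))

def output_columns_py_alt (base_columns : List String) (rows : List (List (String × String))) (extra_columns : List String) : List String :=
  let base := base_columns
  let candidates := if base.isEmpty then rows.flatMap (fun row => row.map Prod.fst) else base
  dedupLoop (candidates ++ extra_columns) []

-- ===== PRECONDITION & SPEC =====
def Spec_output_columns_py (base_columns : List String) (rows : List (List (String × String))) (extra_columns : List String) (out : List String) : Prop := out = output_columns_py_alt base_columns rows extra_columns
instance (base_columns : List String) (rows : List (List (String × String))) (extra_columns : List String) (out : List String) : Decidable (Spec_output_columns_py base_columns rows extra_columns out) := by unfold Spec_output_columns_py; infer_instance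

-- ===== CLAIM =====
def Claim_equal_output_columns_py : Prop := ∀ (base_columns : List String) (rows : List (List (String × String))) (extra_columns : List String), Dom_output_columns_py base_columns rows extra_columns → Spec_output_columns_py base_columns rows extra_columns (output_columns_py base_columns rows extra_columns)

-- ===== LEMMAS AND PROOFS =====

-- proof-only recursive view of the select-and-filter loop: keep the head, filter out its later copies, recurse
def dedupR : List String → List String
  | [] => []
  | x :: xs => x :: dedupR (xs.filter (fun y => y ≠ x))
termination_by l => l.length
decreasing_by
  simp only [List.length_cons, List.length_unattach]
  exact Nat.lt_succ_of_le ((List.length_filter_le _ _).trans (by simp))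


-- A's append-if-absent step is exactly PySem.Set.add.
theorem stepA_eq : (fun (cols : List String) (c : String) => if cols.contains c then cols else cols ++ [c]) = PySem.Set.add := rfl

theorem dedupR_nil : dedupR [] = [] := by rw [dedupR.eq_def]

theorem dedupLoop_eq_aux (n : Nat) : ∀ (items out : List String), items.length ≤ n →
    dedupLoop items out = out ++ dedupR items := by
  induction n with
  | zero =>
    intro items out h
    have : items = [] := List.eq_nil_of_length_eq_zero (Nat.le_zero.mp h)
    subst this
    rw [dedupLoop.eq_def, dedupR_nil]; simp
  | succ n ih =>
    intro items out h
    cases items with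
    | nil => rw [dedupLoop.eq_def, dedupR_nil]; simp
    | cons x xs =>
      rw [dedupLoop.eq_def, dedupR.eq_def]
      simp only []
      rw [ih _ (out ++ [x]) ((List.length_filter_le _ _).trans (by simpa using h))]
      simp

theorem dedupLoop_eq (items out : List String) : dedupLoop items out = out ++ dedupR items :=
  dedupLoop_eq_aux items.length items out (Nat.le_refl _)

theorem dedupR_cons (x : String) (xs : List String) :
    dedupR (x :: xs) = x :: dedupR (xs.filter (fun y => y ≠ x)) := by
  rw [dedupR.eq_def]

-- Folding Set.add from acc is acc followed by the recursive dedup of the elements not already in acc.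
theorem foldl_add_eq_dedupR (xs : List String) (acc : List String) :
    List.foldl PySem.Set.add acc xs = acc ++ dedupR (xs.filter (fun y => !acc.contains y)) := by
  induction xs generalizing acc with
  | nil => simp [dedupR_nil]
  | cons x xs ih =>
    rw [List.foldl_cons, ih]
    by_cases hx : x ∈ acc
    · simp [PySem.Set.add, hx]
    · have hadd : PySem.Set.add acc x = acc ++ [x] := by
        simp [PySem.Set.add, PySem.Set.contains, hx]
      have hfa : (x :: xs).filter (fun y => !acc.contains y)
          = x :: xs.filter (fun y => !acc.contains y) := by
        simp [hx]
      rw [hadd, hfa, dedupR_cons, List.append_assoc, List.singleton_append]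
      congr 2
      rw [List.filter_filter]
      congr 1
      apply List.filter_congr
      intro y _
      by_cases hy : y = x <;> by_cases hya : y ∈ acc <;>
        simp [hy, hya]

theorem dedupR_of_foldl_nil (xs : List String) :
    List.foldl PySem.Set.add [] xs = dedupR xs := by
  rw [foldl_add_eq_dedupR]; simp

theorem dedup_ne_nil (x : String) (xs : List String) : PySem.List.dedup (x :: xs) ≠ [] := by
  intro h
  have hx : x ∈ PySem.List.dedup (x :: xs) := by
    rw [PySem.List.mem_dedup]; exact List.mem_cons_self
  rw [h] at hx
  exact (List.not_mem_nil) hx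

-- The nested rows loop is the fold of Set.add over all row keys in order.
theorem foldl_rows (rows : List (List (String × String))) (init : List String) :
    rows.foldl (fun cols row =>
        row.foldl (fun cols p => if cols.contains p.1 then cols else cols ++ [p.1]) cols) init
      = List.foldl PySem.Set.add init (rows.flatMap (fun row => row.map Prod.fst)) := by
  induction rows generalizing init with
  | nil => rfl
  | cons r rs ih =>
    simp only [List.foldl_cons, List.flatMap_cons, List.foldl_append, List.foldl_map, ih]
    rfl

-- ===== VERDICT =====
theorem output_columns_py_spec : Claim_equal_output_columns_py := by
  intro base rows extra _
  unfold Spec_output_columns_py output_columns_py output_columns_py_alt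
  cases base with
  | nil =>
    simp only [List.isEmpty_nil, show PySem.List.dedup ([] : List String) = [] from rfl,
      if_true]
    rw [foldl_rows, stepA_eq, ← List.foldl_append, dedupR_of_foldl_nil, dedupLoop_eq, List.nil_append]
  | cons b bs =>
    have h1 : (PySem.List.dedup (b :: bs)).isEmpty = false := by
      cases h : PySem.List.dedup (b :: bs) with
      | nil => exact absurd h (dedup_ne_nil b bs)
      | cons => rfl
    simp only [h1, List.isEmpty_cons, Bool.false_eq_true, if_false]
    rw [stepA_eq, show PySem.List.dedup (b :: bs) = List.foldl PySem.Set.add [] (b :: bs) from rfl,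
      ← List.foldl_append, dedupR_of_foldl_nil, dedupLoop_eq, List.nil_append]
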